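-- pv_equiv track=rewrite | github.com/OnlpLab/Hebrew-Dependency-Parsing | eval_utils.py | las_evaluation
-- ===== SOURCE A (Python) =====
-- from collections import Counter
--
-- def las_evaluation(dep_predict, gold_dep, head_predict, gold_head, test_sentence, gold_sentence):
--     gold_counts, pred_counts, intersection_counts = 0, 0, 0
--     for i, (p_dep, g_dep, p_head, g_head, p_sentence, g_sentence) in enumerate(zip(dep_predict, gold_dep, head_predict, gold_head, test_sentence, gold_sentence)):
--         pred_pair = [(word, head, dep) for word, head, dep in zip(p_sentence, p_head, p_dep)]
--         gold_pair = [(word, head, dep) for word, head, dep in zip(g_sentence, g_head, g_dep)]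
--
--         gold_count, pred_count = Counter(gold_pair), Counter(pred_pair)
--         intersection_count = gold_count & pred_count
--
--         gold_counts += sum(gold_count.values())
--         pred_counts += sum(pred_count.values())
--         intersection_counts += sum(intersection_count.values())
--
--     return gold_counts, pred_counts, intersection_counts
-- ===== SOURCE B (Python) =====
-- def las_evaluation(dep_predict, gold_dep, head_predict, gold_head, test_sentence, gold_sentence):
--     gold_counts, pred_counts, intersection_counts = 0, 0, 0
--     for p_dep, g_dep, p_head, g_head, p_sentence, g_sentence in zip(
--             dep_predict, gold_dep, head_predict, gold_head, test_sentence, gold_sentence):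
--         gold_triples = sorted(zip(g_sentence, g_head, g_dep))
--         pred_triples = sorted(zip(p_sentence, p_head, p_dep))
--         gold_counts += len(gold_triples)
--         pred_counts += len(pred_triples)
--         # two-pointer merge over the two sorted triple lists: each match
--         # consumed from both sides = one element of the multiset intersection
--         i, j = 0, 0
--         while i < len(gold_triples) and j < len(pred_triples):
--             if gold_triples[i] < pred_triples[j]:
--                 i += 1
--             elif pred_triples[j] < gold_triples[i]:
--                 j += 1
--             else:
--                 intersection_counts += 1
--                 i += 1
--                 j += 1
--     return gold_counts, pred_counts, intersection_counts
-- ===== Notes on version B (the rewrite author's own statement) =====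
-- stated objective: alternative
-- what changed: Replaces the per-sentence two-Counter construction and Counter-& intersection with sorting both triple lists and counting common elements by a two-pointer merge scan.
import Mathlib
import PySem

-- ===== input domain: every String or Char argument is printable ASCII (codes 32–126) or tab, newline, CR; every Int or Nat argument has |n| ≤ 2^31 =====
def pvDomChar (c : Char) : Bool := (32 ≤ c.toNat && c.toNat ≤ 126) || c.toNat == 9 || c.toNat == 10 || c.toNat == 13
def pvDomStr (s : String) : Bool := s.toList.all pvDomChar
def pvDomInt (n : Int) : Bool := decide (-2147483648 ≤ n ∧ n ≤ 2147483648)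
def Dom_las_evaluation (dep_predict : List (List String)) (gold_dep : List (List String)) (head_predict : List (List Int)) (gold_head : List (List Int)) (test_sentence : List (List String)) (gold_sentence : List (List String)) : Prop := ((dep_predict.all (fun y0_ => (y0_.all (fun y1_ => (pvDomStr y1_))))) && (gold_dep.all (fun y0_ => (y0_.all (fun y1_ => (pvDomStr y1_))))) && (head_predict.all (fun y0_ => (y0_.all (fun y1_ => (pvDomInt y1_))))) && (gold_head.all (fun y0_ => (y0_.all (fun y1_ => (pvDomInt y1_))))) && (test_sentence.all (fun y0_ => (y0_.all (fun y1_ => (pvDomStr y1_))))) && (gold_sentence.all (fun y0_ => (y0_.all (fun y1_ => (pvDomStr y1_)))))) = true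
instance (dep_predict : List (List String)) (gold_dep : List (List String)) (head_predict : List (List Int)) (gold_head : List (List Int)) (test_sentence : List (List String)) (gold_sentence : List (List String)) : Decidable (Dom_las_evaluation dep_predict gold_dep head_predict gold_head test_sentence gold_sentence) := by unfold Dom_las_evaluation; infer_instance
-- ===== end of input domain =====

-- B replaces the per-sentence two-Counter + Counter-& intersection with sorting both
-- triple lists and counting common elements by a two-pointer merge scan (alternative algorithm).

-- Python's n-ary zip (stops at the shortest argument), used by both ports.
def pyZip3 {α β γ : Type} : List α → List β → List γ → List (α × β × γ)
  | a :: as, b :: bs, c :: cs => (a, b, c) :: pyZip3 as bs cs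
  | _, _, _ => []

def pyZip6 {α β γ δ ε ζ : Type} : List α → List β → List γ → List δ → List ε → List ζ →
    List (α × β × γ × δ × ε × ζ)
  | a :: as, b :: bs, c :: cs, d :: ds, e :: es, f :: fs =>
      (a, b, c, d, e, f) :: pyZip6 as bs cs ds es fs
  | _, _, _, _, _, _ => []

-- ===== PORT A =====
def las_evaluation (dep_predict : List (List String)) (gold_dep : List (List String)) (head_predict : List (List Int)) (gold_head : List (List Int)) (test_sentence : List (List String)) (gold_sentence : List (List String)) : Int × Int × Int :=
  (pyZip6 dep_predict gold_dep head_predict gold_head test_sentence gold_sentence).foldl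
    (fun acc x =>
      let pred_pair := pyZip3 x.2.2.2.2.1 x.2.2.1 x.1
      let gold_pair := pyZip3 x.2.2.2.2.2 x.2.2.2.1 x.2.1
      let gold_count := PySem.Dict.counter gold_pair
      let pred_count := PySem.Dict.counter pred_pair
      -- Counter.__and__: iterate over self's items, newcount = min, keep the positive ones
      let intersection_count := gold_count.items.foldl
        (fun r kc =>
          let newcount := min kc.2 (pred_count.getD kc.1 0)
          if 0 < newcount then r.insert kc.1 newcount else r)
        PySem.Dict.empty
      (acc.1 + gold_count.values.sum, acc.2.1 + pred_count.values.sum,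
       acc.2.2 + intersection_count.values.sum))
    (0, 0, 0)

-- ===== PORT B =====
-- Python's tuple '<' on (str, int, str): lexicographic.
abbrev tripLt (a b : String × Int × String) : Prop :=
  a.1 < b.1 ∨ (a.1 = b.1 ∧ (a.2.1 < b.2.1 ∨ (a.2.1 = b.2.1 ∧ a.2.2 < b.2.2)))

def tripLtB (a b : String × Int × String) : Bool := decide (tripLt a b)

-- the comparison `sorted` uses (non-strict order, for mergeSort)
def tripLe (a b : String × Int × String) : Bool := !(tripLtB b a)

-- the two-pointer while loop of Source B, as structural recursion on the two sorted lists
def mergeCount : List (String × Int × String) → List (String × Int × String) → Int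
  | a :: as, b :: bs =>
    if tripLtB a b then mergeCount as (b :: bs)
    else if tripLtB b a then mergeCount (a :: as) bs
    else mergeCount as bs + 1
  | _, _ => 0
termination_by a b => a.length + b.length

def las_evaluation_alt (dep_predict : List (List String)) (gold_dep : List (List String)) (head_predict : List (List Int)) (gold_head : List (List Int)) (test_sentence : List (List String)) (gold_sentence : List (List String)) : Int × Int × Int :=
  (pyZip6 dep_predict gold_dep head_predict gold_head test_sentence gold_sentence).foldl
    (fun acc x =>
      let gold_triples := (pyZip3 x.2.2.2.2.2 x.2.2.2.1 x.2.1).mergeSort tripLe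
      let pred_triples := (pyZip3 x.2.2.2.2.1 x.2.2.1 x.1).mergeSort tripLe
      (acc.1 + (gold_triples.length : Int), acc.2.1 + (pred_triples.length : Int),
       acc.2.2 + mergeCount gold_triples pred_triples))
    (0, 0, 0)

-- ===== PRECONDITION & SPEC =====
def Spec_las_evaluation (dep_predict : List (List String)) (gold_dep : List (List String)) (head_predict : List (List Int)) (gold_head : List (List Int)) (test_sentence : List (List String)) (gold_sentence : List (List String)) (out : Int × Int × Int) : Prop := out = las_evaluation_alt dep_predict gold_dep head_predict gold_head test_sentence gold_sentence
instance (dep_predict : List (List String)) (gold_dep : List (List String)) (head_predict : List (List Int)) (gold_head : List (List Int)) (test_sentence : List (List String)) (gold_sentence : List (List String)) (out : Int × Int × Int) : Decidable (Spec_las_evaluation dep_predict gold_dep head_predict gold_head test_sentence gold_sentence out) := by unfold Spec_las_evaluation; infer_instance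

-- ===== CLAIM (what is proved, stated in full; the proofs are below) =====
def Claim_equal_las_evaluation : Prop := ∀ (dep_predict : List (List String)) (gold_dep : List (List String)) (head_predict : List (List Int)) (gold_head : List (List Int)) (test_sentence : List (List String)) (gold_sentence : List (List String)), Dom_las_evaluation dep_predict gold_dep head_predict gold_head test_sentence gold_sentence → Spec_las_evaluation dep_predict gold_dep head_predict gold_head test_sentence gold_sentence (las_evaluation dep_predict gold_dep head_predict gold_head test_sentence gold_sentence)

-- ===== LEMMAS AND PROOFS =====

-- tripLt is the lexicographic (Prod.Lex) strict order, so it is asymmetric/transitive/trichotomous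
def tripEmb (a : String × Int × String) : String ×ₗ (Int ×ₗ String) := toLex (a.1, toLex a.2)

theorem tripLt_iff (a b : String × Int × String) : tripLt a b ↔ tripEmb a < tripEmb b := by
  simp [tripLt, tripEmb, Prod.Lex.lt_iff]

theorem tripEmb_inj {a b : String × Int × String} (h : tripEmb a = tripEmb b) : a = b := by
  unfold tripEmb at h
  have h1 := congrArg (fun x => (ofLex x).1) h
  have h2 := congrArg (fun x => ofLex (ofLex x).2) h
  simp at h1 h2
  exact Prod.ext h1 h2

theorem tripLt_asymm {a b : String × Int × String} (h : tripLt a b) : ¬ tripLt b a := by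
  rw [tripLt_iff] at *; exact lt_asymm h

theorem tripLt_trans {a b c : String × Int × String} (h1 : tripLt a b) (h2 : tripLt b c) : tripLt a c := by
  rw [tripLt_iff] at *; exact lt_trans h1 h2

theorem tripLt_trichotomy (a b : String × Int × String) : tripLt a b ∨ a = b ∨ tripLt b a := by
  rcases lt_trichotomy (tripEmb a) (tripEmb b) with h | h | h
  · exact Or.inl ((tripLt_iff a b).mpr h)
  · exact Or.inr (Or.inl (tripEmb_inj h))
  · exact Or.inr (Or.inr ((tripLt_iff b a).mpr h))

theorem tripLe_iff (a b : String × Int × String) : tripLe a b = true ↔ ¬ tripLt b a := by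
  unfold tripLe tripLtB
  simp only [Bool.not_eq_true', decide_eq_false_iff_not]

theorem tripLe_trans (a b c : String × Int × String) (h1 : tripLe a b = true) (h2 : tripLe b c = true) : tripLe a c = true := by
  rw [tripLe_iff] at *
  intro hca
  rcases tripLt_trichotomy a b with h | h | h
  · exact h2 (tripLt_trans hca h)
  · exact h2 (h ▸ hca)
  · exact h1 h

theorem tripLe_total (a b : String × Int × String) : (tripLe a b || tripLe b a) = true := by
  rcases tripLt_trichotomy a b with h | h | h
  · have : tripLe a b = true := (tripLe_iff a b).mpr (tripLt_asymm h)
    simp [this]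
  · subst h
    have : tripLe a a = true := (tripLe_iff a a).mpr (fun hh => tripLt_asymm hh hh)
    simp [this]
  · have : tripLe b a = true := (tripLe_iff b a).mpr (tripLt_asymm h)
    simp [this]

-- merge-count on sorted lists computes the multiset-intersection cardinality
theorem mergeCount_eq :
    ∀ (a b : List (String × Int × String)),
    a.Pairwise (fun x y => ¬ tripLt y x) → b.Pairwise (fun x y => ¬ tripLt y x) →
    mergeCount a b = ((((↑a : Multiset (String × Int × String)) ∩ ↑b).card : ℕ) : Int) := by
  intro a b
  induction a, b using mergeCount.induct with
  | case1 a as b bs hlt ih =>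
    intro ha hb
    have hab : tripLt a b := by
      have h' := hlt; unfold tripLtB at h'; exact of_decide_eq_true h'
    have hnotmem : a ∉ (b :: bs) := by
      intro hm
      rcases List.mem_cons.mp hm with he | hm
      · exact tripLt_asymm (he ▸ hab) (he ▸ hab)
      · exact (List.pairwise_cons.mp hb).1 _ hm hab
    have hco : ((↑(a :: as) : Multiset (String × Int × String)) ∩ ↑(b :: bs))
        = (↑as : Multiset (String × Int × String)) ∩ ↑(b :: bs) := by
      rw [← Multiset.cons_coe, Multiset.cons_inter_of_neg _ (by simpa using hnotmem)]
    unfold mergeCount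
    rw [if_pos hlt, ih ha.of_cons hb, hco]
  | case2 a as b bs hnlt hlt ih =>
    intro ha hb
    have hba : tripLt b a := by
      have h' := hlt; unfold tripLtB at h'; exact of_decide_eq_true h'
    have hnotmem : b ∉ (a :: as) := by
      intro hm
      rcases List.mem_cons.mp hm with he | hm
      · exact tripLt_asymm (he ▸ hba) (he ▸ hba)
      · exact (List.pairwise_cons.mp ha).1 _ hm hba
    have hco : ((↑(a :: as) : Multiset (String × Int × String)) ∩ ↑(b :: bs))
        = (↑(a :: as) : Multiset (String × Int × String)) ∩ ↑bs := by
      rw [Multiset.inter_comm, ← Multiset.cons_coe,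
          Multiset.cons_inter_of_neg _ (by simpa using hnotmem), Multiset.inter_comm]
    unfold mergeCount
    rw [if_neg hnlt, if_pos hlt, ih ha hb.of_cons, hco]
  | case3 a as b bs hnlt hnlt' ih =>
    intro ha hb
    have hne1 : ¬ tripLt a b := fun hh => hnlt (by unfold tripLtB; exact decide_eq_true hh)
    have hne2 : ¬ tripLt b a := fun hh => hnlt' (by unfold tripLtB; exact decide_eq_true hh)
    have hab : a = b := by
      rcases tripLt_trichotomy a b with h | h | h
      · exact absurd h hne1
      · exact h
      · exact absurd h hne2
    subst hab
    have hco : ((↑(a :: as) : Multiset (String × Int × String)) ∩ ↑(a :: bs))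
        = a ::ₘ ((↑as : Multiset (String × Int × String)) ∩ ↑bs) := by
      rw [← Multiset.cons_coe, Multiset.cons_inter_of_pos _ (by simp),
          ← Multiset.cons_coe, Multiset.erase_cons_head]
    unfold mergeCount
    rw [if_neg hnlt, if_neg hnlt', ih ha.of_cons hb.of_cons, hco]
    simp
  | case4 a b h =>
    intro _ _
    unfold mergeCount
    rcases a with _ | ⟨x, xs⟩
    · simp
    · rcases b with _ | ⟨y, ys⟩
      · simp
      · exact (h x xs y ys rfl rfl).elim

theorem mergeCount_sorted (g p : List (String × Int × String)) :
    mergeCount (g.mergeSort tripLe) (p.mergeSort tripLe)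
    = ((((↑p : Multiset (String × Int × String)) ∩ ↑g).card : ℕ) : Int) := by
  have hg := List.pairwise_mergeSort tripLe_trans tripLe_total g
  have hp := List.pairwise_mergeSort tripLe_trans tripLe_total p
  have hg' : (g.mergeSort tripLe).Pairwise (fun x y => ¬ tripLt y x) :=
    hg.imp (fun h => (tripLe_iff _ _).mp h)
  have hp' : (p.mergeSort tripLe).Pairwise (fun x y => ¬ tripLt y x) :=
    hp.imp (fun h => (tripLe_iff _ _).mp h)
  rw [mergeCount_eq _ _ hg' hp']
  have e1 : (↑(g.mergeSort tripLe) : Multiset (String × Int × String)) = ↑g :=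
    Multiset.coe_eq_coe.mpr (List.mergeSort_perm g tripLe)
  have e2 : (↑(p.mergeSort tripLe) : Multiset (String × Int × String)) = ↑p :=
    Multiset.coe_eq_coe.mpr (List.mergeSort_perm p tripLe)
  rw [e1, e2, Multiset.inter_comm]

-- ===== A-side characterisation lemmas =====
theorem items_insert_fresh {κ ν : Type} [BEq κ] (d : PySem.Dict κ ν) (k : κ) (v : ν) (h : d.contains k = false) :
    (d.insert k v).items = d.items ++ [(k, v)] := by
  unfold PySem.Dict.insert
  rw [h]; simp

theorem contains_insert_eq {κ ν : Type} [BEq κ] (d : PySem.Dict κ ν) (k : κ) (v : ν)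
    (h : d.contains k = false) (x : κ) :
    (d.insert k v).contains x = (d.contains x || (k == x)) := by
  unfold PySem.Dict.contains
  rw [items_insert_fresh d k v h]
  simp [List.any_append]

theorem values_sum_insert_fresh {κ : Type} [BEq κ] (d : PySem.Dict κ Int) (k : κ) (v : Int) (h : d.contains k = false) :
    (d.insert k v).values.sum = d.values.sum + v := by
  simp [PySem.Dict.values, items_insert_fresh d k v h]

theorem inter_fold_sum_generic {κ : Type} [BEq κ] [LawfulBEq κ] (q : κ → Int) :
    ∀ (l : List (κ × Int)) (r : PySem.Dict κ Int),
    (∀ kc ∈ l, r.contains kc.1 = false) → (l.map (·.1)).Nodup →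
    (l.foldl
      (fun r kc =>
        if 0 < min kc.2 (q kc.1) then r.insert kc.1 (min kc.2 (q kc.1)) else r) r).values.sum
    = r.values.sum + (l.map (fun kc => if 0 < min kc.2 (q kc.1) then min kc.2 (q kc.1) else 0)).sum := by
  intro l
  induction l with
  | nil => intro r _ _; simp
  | cons kc rest ih =>
    intro r hfresh hnd
    simp only [List.foldl_cons, List.map_cons, List.sum_cons]
    by_cases hpos : 0 < min kc.2 (q kc.1)
    · simp only [hpos, if_pos]
      rw [ih _ ?_ (by simpa using hnd.of_cons)]
      · rw [values_sum_insert_fresh _ _ _ (hfresh kc (List.mem_cons_self))]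
        simp
        ring
      · intro x hx
        rw [contains_insert_eq _ _ _ (hfresh kc (List.mem_cons_self))]
        have h1 : r.contains x.1 = false := hfresh x (List.mem_cons_of_mem _ hx)
        have h2 : ¬ (kc.1 = x.1) := by
          simp only [List.map_cons, List.nodup_cons] at hnd
          intro he
          exact hnd.1 (he ▸ List.mem_map_of_mem hx)
        simp [h1, beq_eq_false_iff_ne.mpr h2]
    · simp only [hpos, if_false]
      rw [ih _ (fun x hx => hfresh x (List.mem_cons_of_mem _ hx)) (by simpa using hnd.of_cons)]
      simp

theorem sum_dedup_toFinset {α : Type} [DecidableEq α] [BEq α] [LawfulBEq α] (g : List α) (f : α → Int) :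
    ((PySem.List.dedup g).map f).sum = ∑ a ∈ g.toFinset, f a := by
  rw [← List.sum_toFinset _ (PySem.List.nodup_dedup g)]
  congr 1
  ext a
  simp

theorem sum_min_counts_eq_inter_card {α : Type} [DecidableEq α] [instB : BEq α] [LawfulBEq α] (g p : List α) :
    (∑ a ∈ g.toFinset, (min (p.count a) (g.count a) : ℕ)) = ((↑p : Multiset α) ∩ (↑g : Multiset α)).card := by
  have hbe : instB = instBEqOfDecidableEq := lawful_beq_subsingleton _ _
  subst hbe
  have hsub : ((↑p : Multiset α) ∩ (↑g : Multiset α)).toFinset ⊆ g.toFinset := by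
    intro a ha
    rw [Multiset.mem_toFinset] at ha
    exact List.mem_toFinset.mpr (by exact_mod_cast (Multiset.mem_inter.mp ha).2)
  calc (∑ a ∈ g.toFinset, (min (p.count a) (g.count a) : ℕ))
      = ∑ a ∈ g.toFinset, ((↑p : Multiset α) ∩ (↑g : Multiset α)).count a := by
        refine Finset.sum_congr rfl (fun a _ => ?_)
        rw [Multiset.count_inter, Multiset.coe_count, Multiset.coe_count]
    _ = ∑ a ∈ ((↑p : Multiset α) ∩ (↑g : Multiset α)).toFinset,
          ((↑p : Multiset α) ∩ (↑g : Multiset α)).count a := by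
        refine (Finset.sum_subset hsub (fun a _ ha => ?_)).symm
        exact Multiset.count_eq_zero_of_notMem (by simpa using ha)
    _ = ((↑p : Multiset α) ∩ (↑g : Multiset α)).card := Multiset.toFinset_sum_count_eq _

theorem inter_fold_values_sum {α : Type} [DecidableEq α] [BEq α] [LawfulBEq α] (g p : List α) :
    ((PySem.Dict.counter g).items.foldl
      (fun r kc =>
        let newcount := min kc.2 ((PySem.Dict.counter p).getD kc.1 0)
        if 0 < newcount then r.insert kc.1 newcount else r)
      PySem.Dict.empty).values.sum
    = (((↑p : Multiset α) ∩ (↑g : Multiset α)).card : Int) := by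
  have hzeta : (fun (r : PySem.Dict α Int) (kc : α × Int) =>
      let newcount := min kc.2 ((PySem.Dict.counter p).getD kc.1 0)
      if 0 < newcount then r.insert kc.1 newcount else r)
    = (fun (r : PySem.Dict α Int) (kc : α × Int) =>
      if 0 < min kc.2 ((PySem.Dict.counter p).getD kc.1 0) then
        r.insert kc.1 (min kc.2 ((PySem.Dict.counter p).getD kc.1 0)) else r) := rfl
  rw [hzeta, inter_fold_sum_generic (fun k => (PySem.Dict.counter p).getD k 0) ((PySem.Dict.counter g).items) PySem.Dict.empty ?_ ?_]
  · rw [PySem.Dict.items_counter]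
    have hmap : ((PySem.Set.ofList g).map (fun k => (k, (g.count k : Int)))).map
        (fun kc => if 0 < min kc.2 ((PySem.Dict.counter p).getD kc.1 0) then min kc.2 ((PySem.Dict.counter p).getD kc.1 0) else 0)
        = (PySem.List.dedup g).map (fun k => ((min (p.count k) (g.count k) : ℕ) : Int)) := by
      rw [← PySem.List.dedup_eq_ofList, List.map_map]
      apply List.map_congr_left
      intro k _
      simp only [Function.comp]
      rw [PySem.Dict.getD_counter]
      rcases Nat.eq_zero_or_pos (min (p.count k) (g.count k)) with h0 | hp
      · have : min ((g.count k : Int)) ((p.count k : Int)) = 0 := by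
          rcases Nat.min_eq_zero_iff.mp h0 with h | h <;> simp [h]
        simp [this, h0]
      · have : (0:Int) < min ((g.count k : Int)) ((p.count k : Int)) := by
          push_cast [← Nat.cast_min]
          omega
        rw [if_pos this]
        push_cast [← Nat.cast_min]
        omega
    rw [hmap, sum_dedup_toFinset]
    simp only [show (PySem.Dict.empty : PySem.Dict α Int).values = [] from rfl]
    push_cast
    rw [← sum_min_counts_eq_inter_card g p]
    push_cast
    simp
  · intro kc _
    exact PySem.Dict.contains_empty kc.1
  · rw [PySem.Dict.items_counter, ← PySem.List.dedup_eq_ofList, List.map_map]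
    simp [Function.comp_def]

theorem counter_values_sum {α : Type} [DecidableEq α] [instB : BEq α] [LawfulBEq α] (g : List α) :
    (PySem.Dict.counter g).values.sum = (g.length : Int) := by
  have hbe : instB = instBEqOfDecidableEq := lawful_beq_subsingleton _ _
  subst hbe
  rw [PySem.Dict.values_eq_map_keys _ (PySem.Dict.nodup_keys_counter g) 0]
  rw [PySem.Dict.keys_counter]
  have h1 : ((PySem.Set.ofList g).map fun k => (PySem.Dict.counter g).getD k 0)
      = (PySem.List.dedup g).map (fun k => (g.count k : Int)) := by
    rw [← PySem.List.dedup_eq_ofList]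
    exact List.map_congr_left (fun k _ => PySem.Dict.getD_counter g k)
  rw [h1, sum_dedup_toFinset]
  have h2 : ∑ a ∈ g.toFinset, (g.count a : Int) = ((∑ a ∈ g.toFinset, g.count a : Nat) : Int) := by
    push_cast; rfl
  rw [h2]
  have h4 : ∑ a ∈ g.toFinset, g.count a = g.length := by
    have h := Multiset.toFinset_sum_count_eq (↑g : Multiset α)
    simp only [Multiset.coe_count, Multiset.coe_card] at h
    exact h
  rw [h4]

-- ===== VERDICT (by name: the statement is the Claim_ definition above) =====
theorem las_evaluation_spec : Claim_equal_las_evaluation := by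
  intro dep_predict gold_dep head_predict gold_head test_sentence gold_sentence _
  unfold Spec_las_evaluation las_evaluation las_evaluation_alt
  apply PySem.List.foldl_congr_mem
  intro acc x _
  have h1 := counter_values_sum (pyZip3 x.2.2.2.2.2 x.2.2.2.1 x.2.1)
  have h2 := counter_values_sum (pyZip3 x.2.2.2.2.1 x.2.2.1 x.1)
  have h3 := inter_fold_values_sum (pyZip3 x.2.2.2.2.2 x.2.2.2.1 x.2.1) (pyZip3 x.2.2.2.2.1 x.2.2.1 x.1)
  have h4 := mergeCount_sorted (pyZip3 x.2.2.2.2.2 x.2.2.2.1 x.2.1) (pyZip3 x.2.2.2.2.1 x.2.2.1 x.1)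
  simp only [h1, h2, h3, h4, List.length_mergeSort]
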